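-- pv_equiv track=rewrite | github.com/Indiana3/python_exercises | wb_chapter8/exercise182.py | spelling
-- ===== SOURCE A (Python) =====
-- def spelling(s, t):
--     # Base case
--     if s == "":
--         return ""
--
--     # Recursive case
--     elif s[:3] in t:
--         return s[:3].capitalize() + spelling(s[3:], t)
--     elif s[:2] in t:
--         return s[:2].capitalize() + spelling(s[2:], t)
--     elif s[:1] in t:
--         return s[:1].capitalize() + spelling(s[1:], t)
--     else:
--         return ""
-- ===== SOURCE B (Python) =====
-- def spelling(s, t):
--     result = ""
--     while s != "":
--         if s[:3] in t:
--             k = 3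
--         elif s[:2] in t:
--             k = 2
--         elif s[:1] in t:
--             k = 1
--         else:
--             break
--         result += s[:k].capitalize()
--         s = s[k:]
--     return result
-- ===== Notes on version B (the rewrite author's own statement) =====
-- stated objective: alternative
-- what changed: Replaced the non-tail recursion that builds the result on the way back out of the calls with an iterative while loop that maintains an output accumulator and slices the input forward, breaking on the first mismatch.
import Mathlib
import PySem

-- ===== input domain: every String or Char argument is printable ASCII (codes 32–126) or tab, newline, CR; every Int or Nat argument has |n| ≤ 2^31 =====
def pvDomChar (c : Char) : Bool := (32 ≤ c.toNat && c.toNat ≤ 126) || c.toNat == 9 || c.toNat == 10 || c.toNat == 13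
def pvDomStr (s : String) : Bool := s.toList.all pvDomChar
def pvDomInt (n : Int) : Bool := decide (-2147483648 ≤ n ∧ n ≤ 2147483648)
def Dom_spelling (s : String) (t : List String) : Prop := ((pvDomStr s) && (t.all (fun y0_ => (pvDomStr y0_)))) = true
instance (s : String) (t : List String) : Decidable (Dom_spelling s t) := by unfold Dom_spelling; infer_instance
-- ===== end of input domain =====

-- B replaces A's non-tail recursion with an iterative accumulator loop (same cost, different decomposition).

-- s.capitalize() on the ASCII domain: first char uppercased, the rest lowered (shared helper of both ports)
def pyCapitalize (cs : List Char) : List Char :=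
  match cs with
  | [] => []
  | c :: rest => PySem.Chars.upperChar c :: PySem.Chars.lower rest

-- ===== PORT A =====
def spellingCore (cs : List Char) (t : List String) : List Char :=
  if hnil : cs = [] then []
  else if t.contains (String.ofList (cs.take 3)) then
    pyCapitalize (cs.take 3) ++ spellingCore (cs.drop 3) t
  else if t.contains (String.ofList (cs.take 2)) then
    pyCapitalize (cs.take 2) ++ spellingCore (cs.drop 2) t
  else if t.contains (String.ofList (cs.take 1)) then
    pyCapitalize (cs.take 1) ++ spellingCore (cs.drop 1) t
  else []
termination_by cs.length
decreasing_by
  all_goals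
    simp only [List.length_drop]
    have := List.length_pos_iff.mpr hnil
    omega

def spelling (s : String) (t : List String) : String :=
  String.ofList (spellingCore s.toList t)

-- ===== PORT B =====
def spellingLoop (cs : List Char) (t : List String) (acc : List Char) : List Char :=
  if hnil : cs = [] then acc
  else
    let k : Nat :=
      if t.contains (String.ofList (cs.take 3)) then 3
      else if t.contains (String.ofList (cs.take 2)) then 2
      else if t.contains (String.ofList (cs.take 1)) then 1
      else 0
    if hk : k = 0 then acc
    else spellingLoop (cs.drop k) t (acc ++ pyCapitalize (cs.take k))
termination_by cs.length
decreasing_by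
  simp only [List.length_drop]
  have := List.length_pos_iff.mpr hnil
  have hk1 : 1 ≤ k := Nat.one_le_iff_ne_zero.mpr hk
  omega

def spelling_alt (s : String) (t : List String) : String :=
  String.ofList (spellingLoop s.toList t [])

-- ===== PRECONDITION & SPEC =====
def Spec_spelling (s : String) (t : List String) (out : String) : Prop := out = spelling_alt s t
instance (s : String) (t : List String) (out : String) : Decidable (Spec_spelling s t out) := by unfold Spec_spelling; infer_instance

-- ===== CLAIM (what is proved, stated in full; the proofs are below) =====
def Claim_equal_spelling : Prop := ∀ (s : String) (t : List String), Dom_spelling s t → Spec_spelling s t (spelling s t)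

-- ===== LEMMAS AND PROOFS =====

theorem spellingLoop_eq (n : Nat) :
    ∀ (cs : List Char), cs.length ≤ n → ∀ (t : List String) (acc : List Char),
      spellingLoop cs t acc = acc ++ spellingCore cs t := by
  induction n with
  | zero =>
    intro cs h t acc
    have : cs = [] := List.length_eq_zero_iff.mp (Nat.le_zero.mp h)
    subst this
    simp [spellingLoop, spellingCore]
  | succ n ih =>
    intro cs h t acc
    by_cases hnil : cs = []
    · subst hnil; simp [spellingLoop, spellingCore]
    · rw [spellingLoop, spellingCore]
      have hlen : 1 ≤ cs.length := by
        cases cs with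
        | nil => exact absurd rfl hnil
        | cons a l => simp
      by_cases h3 : String.ofList (cs.take 3) ∈ t
      · simp [hnil, h3, ih (cs.drop 3) (by simp [List.length_drop]; omega) t]
      · by_cases h2 : String.ofList (cs.take 2) ∈ t
        · simp [hnil, h3, h2, ih (cs.drop 2) (by simp [List.length_drop]; omega) t]
        · by_cases h1 : String.ofList (cs.take 1) ∈ t
          · simp [hnil, h3, h2, h1, ih cs.tail (by simp [List.length_tail]; omega) t]
          · simp [hnil, h3, h2, h1]

-- ===== VERDICT (by name: the statement is the Claim_ definition above) =====
theorem spelling_spec : Claim_equal_spelling := by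
  intro s t _
  unfold Spec_spelling spelling spelling_alt
  rw [spellingLoop_eq s.toList.length s.toList le_rfl t []]
  simp
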